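-- pv_equiv track=rewrite | github.com/Zarkonnen/nb | py/nb.py | entry_height
-- ===== SOURCE A (Python) =====
-- def entry_height(t, display_width):
--     x = 0
--     y = 0
--     t_index = 0
--     while t_index < len(t):
--         if t[t_index] == "\n":
--             x = 0
--             y += 1
--             t_index += 1
--             continue
--         x += 1
--         if x >= display_width:
--             x = 0
--             y += 1
--         t_index += 1
--     return y + 1
-- ===== SOURCE B (Python) =====
-- def entry_height(t, display_width):
--     segs = t.split("\n")
--     return len(segs) + sum(len(seg) // display_width for seg in segs)
-- ===== Notes on version B (the rewrite author's own statement) =====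
-- stated objective: simpler
-- what changed: Replaces the character-by-character cursor simulation (x/y state machine) with split on newline plus closed-form integer arithmetic (one rendered line per segment plus len(seg)//display_width wrap lines); the per-character interpreted loop disappears into C-level str.split.
-- outside the precondition, e.g. on entry_height('ab', 0): A returns 3, B raises ZeroDivisionError; on entry_height('ab', -1): A returns 3, B returns -1
import Mathlib
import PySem

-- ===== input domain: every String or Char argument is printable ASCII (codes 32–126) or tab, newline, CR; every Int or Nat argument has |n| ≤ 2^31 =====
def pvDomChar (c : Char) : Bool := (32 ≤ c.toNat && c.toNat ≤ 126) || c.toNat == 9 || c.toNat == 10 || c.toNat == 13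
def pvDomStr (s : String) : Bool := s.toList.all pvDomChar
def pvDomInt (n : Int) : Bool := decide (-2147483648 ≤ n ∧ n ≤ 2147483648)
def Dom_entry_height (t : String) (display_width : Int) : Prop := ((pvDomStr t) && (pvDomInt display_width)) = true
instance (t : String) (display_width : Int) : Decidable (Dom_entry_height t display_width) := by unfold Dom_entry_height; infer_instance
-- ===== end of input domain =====

-- B replaces A's per-character cursor simulation by split-on-newline plus floor-division arithmetic (objective: simpler).

-- ===== PORT A =====
-- the while loop over t_index with cursor state (x, y), transcribed as structural recursion over the characters
def entryLoopA : List Char → Int → Int → Int → Int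
  | [], _, _, y => y
  | c :: rest, w, x, y =>
    if c = '\n' then entryLoopA rest w 0 (y + 1)
    else
      let x' := x + 1
      if x' ≥ w then entryLoopA rest w 0 (y + 1) else entryLoopA rest w x' y

def entry_height (t : String) (display_width : Int) : Int :=
  entryLoopA t.toList display_width 0 0 + 1

-- ===== PORT B =====
-- Source B: segs = t.split("\n"); return len(segs) + sum(len(seg) // display_width for seg in segs)
-- t.split("\n") → PySem.Str.split? (none only for an empty separator, which "\n" is not, hence getD [])
def entry_height_alt (t : String) (display_width : Int) : Int :=
  let segs := (PySem.Str.split? t "\n").getD []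
  (segs.length : Int) + (segs.map (fun seg => PySem.Int.floordiv (PySem.Str.len seg) display_width)).sum

-- ===== PRECONDITION & SPEC =====
-- Pre_ restricts to the natural domain of a display width (≥ 1): for display_width ≤ 0 A still returns
-- (it wraps on every character) while B's floor division raises ZeroDivisionError at 0 and floors
-- negatively for negative widths, so those non-sensical widths are excluded.
def Pre_entry_height (t : String) (display_width : Int) : Prop := 1 ≤ display_width
instance (t : String) (display_width : Int) : Decidable (Pre_entry_height t display_width) := by unfold Pre_entry_height; infer_instance
def pvWitness_entry_height : String × Int := ("ab\ncde", 2)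

def Spec_entry_height (t : String) (display_width : Int) (out : Int) : Prop := out = entry_height_alt t display_width
instance (t : String) (display_width : Int) (out : Int) : Decidable (Spec_entry_height t display_width out) := by unfold Spec_entry_height; infer_instance

-- ===== CLAIM (what is proved, stated in full; the proofs are below) =====
def Claim_equal_entry_height : Prop := ∀ (t : String) (display_width : Int), Dom_entry_height t display_width → Pre_entry_height t display_width → Spec_entry_height t display_width (entry_height t display_width)

-- ===== LEMMAS AND PROOFS =====

-- segments of a character list split on '\n' (proof-side spec of splitOn for the single-char separator)
def pvSegs : List Char → List (List Char)
  | [] => [[]]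
  | c :: rest =>
    if c = '\n' then [] :: pvSegs rest
    else
      match pvSegs rest with
      | s :: ss => (c :: s) :: ss
      | [] => [[c]]

def pvConsHead (p : List Char) : List (List Char) → List (List Char)
  | s :: ss => (p ++ s) :: ss
  | [] => [p]

theorem pvSegs_ne_nil (cs : List Char) : pvSegs cs ≠ [] := by
  cases cs with
  | nil => simp [pvSegs]
  | cons c rest =>
    simp only [pvSegs]
    split
    · simp
    · cases h : pvSegs rest <;> simp

theorem pvGo_eq (fuel : Nat) :
    ∀ (l cur : List Char) (acc : List (List Char)), l.length ≤ fuel →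
      PySem.Chars.splitOn.go ['\n'] fuel l cur acc = acc.reverse ++ pvConsHead cur.reverse (pvSegs l) := by
  induction fuel with
  | zero =>
    intro l cur acc h
    have : l = [] := List.eq_nil_of_length_eq_zero (Nat.le_zero.mp h)
    subst this
    simp [PySem.Chars.splitOn.go, pvSegs, pvConsHead]
  | succ fuel ih =>
    intro l cur acc h
    cases l with
    | nil => simp [PySem.Chars.splitOn.go, pvSegs, pvConsHead]
    | cons c rest =>
      by_cases hc : c = '\n'
      · subst hc
        have hpre : List.isPrefixOf ['\n'] ('\n' :: rest) = true := by
          simp [List.isPrefixOf]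
        rw [show PySem.Chars.splitOn.go ['\n'] (fuel + 1) ('\n' :: rest) cur acc
              = PySem.Chars.splitOn.go ['\n'] fuel (List.drop 1 ('\n' :: rest)) [] (cur.reverse :: acc) by
              simp [PySem.Chars.splitOn.go, hpre]]
        simp only [List.drop_succ_cons, List.drop_zero]
        rw [ih rest [] (cur.reverse :: acc) (by simpa using Nat.le_of_succ_le_succ h)]
        cases hseg : pvSegs rest with
        | nil => exact absurd hseg (pvSegs_ne_nil rest)
        | cons s ss =>
          simp [pvSegs, hseg, pvConsHead]
      · have hpre : List.isPrefixOf ['\n'] (c :: rest) = false := by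
          simp [List.isPrefixOf]
          exact fun h' => hc h'.symm
        rw [show PySem.Chars.splitOn.go ['\n'] (fuel + 1) (c :: rest) cur acc
              = PySem.Chars.splitOn.go ['\n'] fuel rest (c :: cur) acc by
              simp [PySem.Chars.splitOn.go, hpre]]
        rw [ih rest (c :: cur) acc (by simpa using Nat.le_of_succ_le_succ h)]
        cases hseg : pvSegs rest with
        | nil => exact absurd hseg (pvSegs_ne_nil rest)
        | cons s ss =>
          simp [pvSegs, hseg, hc, pvConsHead]

theorem splitOn_eq_pvSegs (cs : List Char) :
    PySem.Chars.splitOn cs ['\n'] = pvSegs cs := by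
  unfold PySem.Chars.splitOn
  rw [pvGo_eq (cs.length + 1) cs [] [] (Nat.le_succ _)]
  cases hseg : pvSegs cs with
  | nil => exact absurd hseg (pvSegs_ne_nil cs)
  | cons s ss => simp [pvConsHead]

-- main invariant: the cursor loop counts newlines plus wrap lines, with the first segment offset by the current column x
theorem entryLoopA_eq (w : Int) (hw : 1 ≤ w) :
    ∀ (cs : List Char) (x y : Int) (s : List Char) (ss : List (List Char)),
      pvSegs cs = s :: ss → 0 ≤ x → x < w →
      entryLoopA cs w x y
        = y + (ss.length : Int) + (x + (s.length : Int)) / w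
            + (ss.map (fun u => ((u.length : Int)) / w)).sum := by
  intro cs
  induction cs with
  | nil =>
    intro x y s ss hseg hx0 hxw
    simp only [pvSegs] at hseg
    obtain ⟨hs, hss⟩ : ([] : List Char) = s ∧ ([] : List (List Char)) = ss := by
      simpa using hseg
    subst hs; subst hss
    simp [entryLoopA, Int.ediv_eq_zero_of_lt hx0 (by simpa using hxw)]
  | cons c rest ih =>
    intro x y s ss hseg hx0 hxw
    by_cases hc : c = '\n'
    · subst hc
      simp only [pvSegs, if_pos rfl] at hseg
      obtain ⟨hs, hss⟩ : ([] : List Char) = s ∧ pvSegs rest = ss := by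
        simpa using hseg
      subst hs
      cases hrest : pvSegs rest with
      | nil => exact absurd hrest (pvSegs_ne_nil rest)
      | cons s' ss' =>
        rw [hrest] at hss; subst hss
        have := ih 0 (y + 1) s' ss' hrest le_rfl (by omega)
        simp only [entryLoopA, if_pos rfl]
        rw [this]
        have hx : x / w = 0 := Int.ediv_eq_zero_of_lt hx0 hxw
        simp [List.map_cons, List.sum_cons, hx]
        ring
    · simp only [pvSegs, if_neg hc] at hseg
      cases hrest : pvSegs rest with
      | nil => exact absurd hrest (pvSegs_ne_nil rest)
      | cons s' ss' =>
        rw [hrest] at hseg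
        obtain ⟨hs, hss⟩ : c :: s' = s ∧ ss' = ss := by simpa using hseg
        subst hs
        rw [← hss]
        simp only [entryLoopA, if_neg hc]
        by_cases hwrap : x + 1 ≥ w
        · have hxw1 : x + 1 = w := by omega
          rw [if_pos hwrap]
          rw [ih 0 (y + 1) s' ss' hrest le_rfl (by omega)]
          have : (x + ((c :: s').length : Int)) / w = (s'.length : Int) / w + 1 := by
            have : (x + ((c :: s').length : Int)) = (s'.length : Int) + w * 1 := by
              simp [List.length_cons]; push_cast; omega
            rw [this, Int.add_mul_ediv_left _ _ (by omega : w ≠ 0)]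
          rw [this]
          ring
        · rw [if_neg hwrap]
          rw [ih (x + 1) y s' ss' hrest (by omega) (by omega)]
          have : (x + ((c :: s').length : Int)) = (x + 1) + (s'.length : Int) := by
            simp [List.length_cons]; push_cast; ring
          rw [this]

theorem fdiv_eq_ediv_of_pos {a b : Int} (hb : 1 ≤ b) : a.fdiv b = a / b := by
  rw [Int.fdiv_eq_ediv]
  simp [Or.inl (by omega : (0:Int) ≤ b)]

theorem split_newline_eq (t : String) :
    (PySem.Str.split? t "\n").getD [] = (pvSegs t.toList).map String.ofList := by
  simp [PySem.Str.split?, PySem.Chars.split?, splitOn_eq_pvSegs]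

-- ===== VERDICT (by name: the statement is the Claim_ definition above) =====
theorem entry_height_spec : Claim_equal_entry_height := by
  intro t w _hdom hpre
  unfold Spec_entry_height entry_height entry_height_alt
  rw [split_newline_eq]
  cases hseg : pvSegs t.toList with
  | nil => exact absurd hseg (pvSegs_ne_nil t.toList)
  | cons s ss =>
    rw [entryLoopA_eq w hpre t.toList 0 0 s ss hseg le_rfl (by exact hpre)]
    simp only [List.map_cons, List.map_map, List.length_cons, List.sum_cons]
    have hlen : ∀ u : List Char, PySem.Str.len (String.ofList u) = (u.length : Int) := by
      intro u; simp [PySem.Str.len, PySem.Chars.len]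
    simp [PySem.Int.floordiv, fdiv_eq_ediv_of_pos hpre, Function.comp_def, hlen,
      PySem.Str.len, PySem.Chars.len]
    push_cast
    ring
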